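-- pv_equiv track=rewrite | github.com/laurodelacerda/challenges | foobar.py | route_salute
-- ===== SOURCE A (Python) =====
-- def route_salute(hallway :str):                     # O(n²)
--
--     mapping = dict.fromkeys(range(len(hallway)), 0) # n
--     for ind, s in enumerate(hallway):               # n
--
--         if s == "-":
--             continue
--
--         if s == ">":
--             mapping[ind] = hallway[ind:].count("<") # log n ~ n
--
--         if s == "<":
--             mapping[ind] = hallway[:ind].count(">")
--
--     return sum(mapping.values()) # n
-- ===== SOURCE B (Python) =====
-- def route_salute(hallway: str):
--     # O(n) single pass: every '<' crosses each '>' already seen; each crossing pair salutes twice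
--     gt = 0
--     total = 0
--     for c in hallway:
--         if c == '>':
--             gt += 1
--         elif c == '<':
--             total += 2 * gt
--     return total
-- ===== Notes on version B (the rewrite author's own statement) =====
-- stated objective: faster
-- what changed: Replaced the per-index dict of slice-count results (each '>'/'<' rescans a slice of the hallway) by a single left-to-right pass that keeps a running count of '>' seen and adds twice that count at every '<'.
import Mathlib
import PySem

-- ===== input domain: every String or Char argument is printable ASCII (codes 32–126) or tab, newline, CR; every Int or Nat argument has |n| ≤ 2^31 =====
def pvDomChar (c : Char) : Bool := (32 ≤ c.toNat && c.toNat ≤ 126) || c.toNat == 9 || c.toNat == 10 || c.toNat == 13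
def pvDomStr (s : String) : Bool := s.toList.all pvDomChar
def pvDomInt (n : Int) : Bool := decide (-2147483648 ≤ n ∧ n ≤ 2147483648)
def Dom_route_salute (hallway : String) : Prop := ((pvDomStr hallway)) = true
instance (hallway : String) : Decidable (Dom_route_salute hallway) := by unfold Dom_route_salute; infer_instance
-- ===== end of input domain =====

-- B replaces A's per-index dict of slice-count results by one O(n) pass with a running '>' count.

-- ===== PORT A =====
-- the body of A's for-loop over enumerate(hallway)
def rsStep (hallway : String) (m : PySem.Dict Int Int) (p : Int × Char) : PySem.Dict Int Int :=
  if p.2 = '-' then m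
  else
    let m1 := if p.2 = '>' then m.insert p.1 ((PySem.Str.count (PySem.Str.slice hallway (some p.1) none) "<" : Int)) else m
    if p.2 = '<' then m1.insert p.1 ((PySem.Str.count (PySem.Str.slice hallway none (some p.1)) ">" : Int)) else m1

def route_salute (hallway : String) : Int :=
  ((PySem.List.enumerate hallway.toList 0).foldl (rsStep hallway)
    (PySem.Dict.ofList ((PySem.List.pyRange 0 (PySem.Str.len hallway) 1).map (fun k => (k, (0 : Int)))))).values.sum

-- ===== PORT B =====
def route_salute_alt (hallway : String) : Int :=
  (hallway.toList.foldl
    (fun st c =>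
      if c = '>' then (st.1 + 1, st.2)
      else if c = '<' then (st.1, st.2 + 2 * st.1)
      else st)
    ((0 : Int), (0 : Int))).2

-- ===== PRECONDITION & SPEC =====
def Spec_route_salute (hallway : String) (out : Int) : Prop := out = route_salute_alt hallway
instance (hallway : String) (out : Int) : Decidable (Spec_route_salute hallway out) := by unfold Spec_route_salute; infer_instance

-- ===== CLAIM (what is proved, stated in full; the proofs are below) =====
def Claim_equal_route_salute : Prop := ∀ (hallway : String), Dom_route_salute hallway → Spec_route_salute hallway (route_salute hallway)

-- ===== LEMMAS AND PROOFS =====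

-- number of crossing pairs ('>' before a later '<'), counted at the '>'
def crossF : List Char → Int
  | [] => 0
  | c :: t => (if c = '>' then (t.count '<' : Int) else 0) + crossF t

-- Python str.count with a single-character needle is List.count
theorem count_go_singleton (c : Char) : ∀ (s : List Char) (fuel acc : Nat), s.length ≤ fuel →
    PySem.Chars.count.go [c] fuel s acc = acc + s.count c := by
  intro s
  induction s with
  | nil => intro fuel acc _; cases fuel <;> simp [PySem.Chars.count.go]
  | cons x t ih =>
    intro fuel acc h
    cases fuel with
    | zero => simp at h
    | succ f =>
      simp only [PySem.Chars.count.go]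
      by_cases hx : x = c
      · subst hx
        have hpre : ([x] : List Char).isPrefixOf (x :: t) = true := by simp [List.isPrefixOf]
        rw [if_pos hpre, show List.drop ([x] : List Char).length (x :: t) = t from rfl,
          ih f (acc + 1) (by simp at h; omega)]
        simp [List.count_cons]
        omega
      · have hpre : (([c] : List Char).isPrefixOf (x :: t)) = false := by
          simp [List.isPrefixOf]; exact fun h => absurd h.symm hx
        rw [if_neg (by simp [hpre])]
        rw [ih f acc (by simp at h; omega)]
        simp [List.count_cons, hx]

theorem chars_count_singleton (s : List Char) (c : Char) :
    PySem.Chars.count s [c] = s.count c := by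
  simp only [PySem.Chars.count, List.isEmpty_cons, if_false, Bool.false_eq_true]
  simpa using count_go_singleton c s s.length 0 le_rfl

-- rsStep at a key different from the processed index changes nothing
theorem getD_rsStep_ne (hallway : String) (d : PySem.Dict Int Int) (p : Int × Char)
    (k : Int) (hk : k ≠ p.1) : (rsStep hallway d p).getD k 0 = d.getD k 0 := by
  unfold rsStep
  split_ifs <;> simp [PySem.Dict.getD_insert, hk]

-- indices strictly before the suffix are untouched by the rest of the loop
theorem foldA_getD_lt (hallway : String) : ∀ (xs : List Char) (s : Int) (d : PySem.Dict Int Int)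
    (k : Int), k < s →
    ((PySem.List.enumerate xs s).foldl (rsStep hallway) d).getD k 0 = d.getD k 0 := by
  intro xs
  induction xs with
  | nil => intro s d k _; simp [PySem.List.enumerate]
  | cons c t ih =>
    intro s d k hk
    rw [PySem.List.enumerate_cons, List.foldl_cons]
    rw [ih (s + 1) _ k (by omega)]
    exact getD_rsStep_ne hallway d (s, c) k (by omega)

-- the final value stored at index s+j
theorem foldA_getD_at (hallway : String) : ∀ (xs : List Char) (s : Int) (d : PySem.Dict Int Int)
    (j : Nat), j < xs.length →
    ((PySem.List.enumerate xs s).foldl (rsStep hallway) d).getD (s + j) 0 =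
      (if xs.getD j ' ' = '>' then (PySem.Str.count (PySem.Str.slice hallway (some (s + j)) none) "<" : Int)
       else if xs.getD j ' ' = '<' then (PySem.Str.count (PySem.Str.slice hallway none (some (s + j))) ">" : Int)
       else d.getD (s + j) 0) := by
  intro xs
  induction xs with
  | nil => intro s d j hj; simp at hj
  | cons c t ih =>
    intro s d j hj
    rw [PySem.List.enumerate_cons, List.foldl_cons]
    cases j with
    | zero =>
      simp only [Nat.cast_zero, Int.add_zero, List.getD_cons_zero]
      rw [foldA_getD_lt hallway t (s + 1) _ s (by omega)]
      unfold rsStep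
      by_cases h1 : c = '-'
      · simp [h1]
      · by_cases h2 : c = '>'
        · simp [h1, h2, PySem.Dict.getD_insert_self]
        · by_cases h3 : c = '<'
          · simp [h1, h2, h3, PySem.Dict.getD_insert_self]
          · simp [h1, h2, h3]
    | succ j' =>
      have hj' : j' < t.length := by simpa using Nat.lt_of_succ_lt_succ hj
      have harith : s + (j' + 1 : Nat) = (s + 1) + (j' : Nat) := by push_cast; ring
      rw [harith, ih (s + 1) _ j' hj']
      simp only [List.getD_cons_succ]
      rw [getD_rsStep_ne hallway d (s, c) ((s + 1) + (j' : Nat)) (by omega)]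

-- rsStep never adds a key that is already present
theorem keys_rsStep (hallway : String) (d : PySem.Dict Int Int) (p : Int × Char)
    (h : d.contains p.1 = true) : (rsStep hallway d p).keys = d.keys := by
  unfold rsStep
  split_ifs with h1 h2 h3 h3
  · rfl
  · rw [PySem.Dict.keys_insert_of_contains _ _ (by
      rw [PySem.Dict.contains_iff_mem_keys] at *
      rw [PySem.Dict.keys_insert_of_contains _ _ (by rwa [PySem.Dict.contains_iff_mem_keys])]
      exact h),
      PySem.Dict.keys_insert_of_contains _ _ h]
  · exact PySem.Dict.keys_insert_of_contains _ _ h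
  · exact PySem.Dict.keys_insert_of_contains _ _ h
  · rfl

-- the loop never changes the key list (every index was seeded by dict.fromkeys)
theorem foldA_keys (hallway : String) : ∀ (xs : List Char) (s : Int) (d : PySem.Dict Int Int),
    (∀ i : Int, s ≤ i → i < s + xs.length → d.contains i = true) →
    ((PySem.List.enumerate xs s).foldl (rsStep hallway) d).keys = d.keys := by
  intro xs
  induction xs with
  | nil => intro s d _; simp [PySem.List.enumerate]
  | cons c t ih =>
    intro s d hcont
    rw [PySem.List.enumerate_cons, List.foldl_cons]
    have hs : d.contains s = true := hcont s le_rfl (by simp)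
    have hkeys : (rsStep hallway d (s, c)).keys = d.keys := keys_rsStep hallway d (s, c) hs
    rw [ih (s + 1) _ (by
      intro i h1 h2
      rw [PySem.Dict.contains_iff_mem_keys, hkeys, ← PySem.Dict.contains_iff_mem_keys]
      exact hcont i (by omega) (by simp at h2 ⊢; omega)), hkeys]

-- seeding with value 0 keeps every lookup (present or absent) at 0
theorem getD_update_const : ∀ (ks : List Int) (d : PySem.Dict Int Int) (k : Int),
    d.getD k 0 = 0 → (d.update (ks.map (fun j => (j, (0 : Int))))).getD k 0 = 0 := by
  intro ks
  induction ks with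
  | nil => intro d k h; simpa [PySem.Dict.update] using h
  | cons a t ih =>
    intro d k h
    simp only [List.map_cons, PySem.Dict.update, List.foldl_cons] at *
    exact ih _ k (by rw [PySem.Dict.getD_insert]; split_ifs <;> simp [h])

-- dict.fromkeys(ks, 0) has exactly the keys ks (when ks has no duplicates)
theorem keys_update_const : ∀ (ks : List Int) (d : PySem.Dict Int Int),
    (∀ j ∈ ks, d.contains j = false) → ks.Nodup →
    (d.update (ks.map (fun j => (j, (0 : Int))))).keys = d.keys ++ ks := by
  intro ks
  induction ks with
  | nil => intro d _ _; simp [PySem.Dict.update]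
  | cons a t ih =>
    intro d hnot hnd
    simp only [List.map_cons, PySem.Dict.update, List.foldl_cons] at *
    rw [List.nodup_cons] at hnd
    have := ih (d.insert a 0) (by
      intro j hj
      rw [PySem.Dict.contains_insert]
      have hja : (j == a) = false := by
        simp [beq_iff_eq]; intro h; exact hnd.1 (h ▸ hj)
      simp [hja, hnot j (List.mem_cons_of_mem _ hj)]) hnd.2
    simp only [PySem.Dict.update] at this
    rw [this, PySem.Dict.keys_insert_of_not_contains _ _ (hnot a (List.mem_cons_self))]
    simp

-- the B-side fold, fully characterised
theorem foldB_spec : ∀ (l : List Char) (g t : Int),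
    l.foldl (fun st c =>
      if c = '>' then (st.1 + 1, st.2)
      else if c = '<' then (st.1, st.2 + 2 * st.1)
      else st) (g, t)
    = (g + (l.count '>' : Int), t + 2 * g * (l.count '<' : Int) + 2 * crossF l) := by
  intro l
  induction l with
  | nil => intro g t; simp [crossF]
  | cons c t' ih =>
    intro g t
    simp only [List.foldl_cons]
    by_cases h2 : c = '>'
    · rw [if_pos h2, ih]
      simp [crossF, h2, List.count_cons]
      constructor
      · push_cast; ring_nf
      · push_cast; ring
    · by_cases h3 : c = '<'
      · rw [if_neg h2, if_pos h3, ih]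
        simp [crossF, h2, h3, List.count_cons]
        push_cast; ring
      · rw [if_neg h2, if_neg h3, ih]
        simp [crossF, List.count_cons, h2, h3]

-- the A-side sum of per-index contributions, with the '>'-prefix count generalised
theorem sumF_aux : ∀ (l : List Char) (g : Int),
    ((List.range l.length).map (fun j =>
      if l.getD j ' ' = '>' then ((l.drop j).count '<' : Int)
      else if l.getD j ' ' = '<' then g + ((l.take j).count '>' : Int)
      else 0)).sum
    = g * (l.count '<' : Int) + 2 * crossF l := by
  intro l
  induction l with
  | nil => intro g; simp [crossF]
  | cons c t ih =>
    intro g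
    rw [List.length_cons, List.range_succ_eq_map, List.map_cons, List.map_map, List.sum_cons]
    have hshift : ((List.range t.length).map ((fun j =>
        if (c :: t).getD j ' ' = '>' then (((c :: t).drop j).count '<' : Int)
        else if (c :: t).getD j ' ' = '<' then g + (((c :: t).take j).count '>' : Int)
        else 0) ∘ Nat.succ)).sum
        = ((List.range t.length).map (fun j =>
          if t.getD j ' ' = '>' then ((t.drop j).count '<' : Int)
          else if t.getD j ' ' = '<' then (g + (if c = '>' then 1 else 0)) + ((t.take j).count '>' : Int)
          else 0)).sum := by
      apply congrArg
      apply List.map_congr_left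
      intro j _
      simp only [Function.comp_apply, List.getD_cons_succ, List.drop_succ_cons, List.take_succ_cons,
        List.count_cons, beq_iff_eq]
      split_ifs <;> push_cast <;> first | rfl | ring
    rw [hshift, ih (g + (if c = '>' then 1 else 0))]
    by_cases h2 : c = '>'
    · simp [h2, crossF, List.count_cons]
      push_cast; ring
    · by_cases h3 : c = '<'
      · simp [h2, h3, crossF, List.count_cons]
        push_cast; ring
      · simp [h2, h3, crossF, List.count_cons]

-- main bridge: A's dict-of-counts sum equals 2 * crossF
theorem routeA_eq (hallway : String) : route_salute hallway = 2 * crossF hallway.toList := by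
  unfold route_salute
  set l := hallway.toList with hl
  set d0 := PySem.Dict.ofList ((PySem.List.pyRange 0 (PySem.Str.len hallway) 1).map (fun k => (k, (0 : Int)))) with hd0
  -- keys of the seed dict
  have hkeys0 : d0.keys = PySem.List.pyRange 0 (l.length : Int) 1 := by
    rw [hd0, PySem.Dict.ofList]
    rw [keys_update_const _ _ (by intro j _; rfl) (PySem.List.nodup_pyRange_one 0 _)]
    simp [PySem.Str.len_eq, PySem.Chars.len_eq, hl, ← String.length_toList]
  have hget0 : ∀ k : Int, d0.getD k 0 = 0 := fun k => getD_update_const _ _ k rfl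
  have hcont0 : ∀ i : Int, 0 ≤ i → i < (0 : Int) + l.length → d0.contains i = true := by
    intro i h1 h2
    rw [PySem.Dict.contains_iff_mem_keys, hkeys0, PySem.List.mem_pyRange_one]
    omega
  set final := (PySem.List.enumerate l 0).foldl (rsStep hallway) d0 with hfin
  have hkeysF : final.keys = PySem.List.pyRange 0 (l.length : Int) 1 := by
    rw [hfin, foldA_keys hallway l 0 d0 hcont0, hkeys0]
  have hnodup : final.keys.Nodup := by rw [hkeysF]; exact PySem.List.nodup_pyRange_one 0 _
  rw [PySem.Dict.values_eq_map_keys final hnodup 0, hkeysF, PySem.List.pyRange_one]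
  simp only [Int.sub_zero, Int.toNat_natCast, List.map_map, Function.comp_def]
  have hpt : ∀ j ∈ List.range l.length, final.getD ((0 : Int) + (j : Int)) 0
      = (if l.getD j ' ' = '>' then ((l.drop j).count '<' : Int)
         else if l.getD j ' ' = '<' then 0 + ((l.take j).count '>' : Int)
         else 0) := by
    intro j hj
    rw [List.mem_range] at hj
    rw [hfin, foldA_getD_at hallway l 0 d0 j hj]
    have hsl1 : PySem.List.slice l (some ((0 : Int) + (j : Nat))) none = l.drop j := by
      rw [Int.zero_add]; exact PySem.List.slice_from_natCast l j
    have hsl2 : PySem.List.slice l none (some ((0 : Int) + (j : Nat))) = l.take j := by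
      rw [Int.zero_add]; exact PySem.List.slice_to_natCast l j
    have hslice1 : (PySem.Str.slice hallway (some ((0 : Int) + (j : Nat))) none).toList = l.drop j := by
      rw [PySem.Str.toList_slice, PySem.Chars.slice_eq_listSlice, ← hl, hsl1]
    have hslice2 : (PySem.Str.slice hallway none (some ((0 : Int) + (j : Nat)))).toList = l.take j := by
      rw [PySem.Str.toList_slice, PySem.Chars.slice_eq_listSlice, ← hl, hsl2]
    split_ifs with h1 h2
    · rw [PySem.Str.count_eq, hslice1, show ("<" : String).toList = ['<'] from rfl,
        chars_count_singleton]
    · rw [PySem.Str.count_eq, hslice2, show (">" : String).toList = ['>'] from rfl,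
        chars_count_singleton]
      simp
    · exact hget0 _
  rw [List.map_congr_left hpt, sumF_aux l 0]
  simp

-- ===== VERDICT (by name: the statement is the Claim_ definition above) =====
theorem route_salute_spec : Claim_equal_route_salute := by
  intro hallway _
  unfold Spec_route_salute route_salute_alt
  rw [routeA_eq, foldB_spec hallway.toList 0 0]
  simp
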